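-- pv_equiv track=rewrite | github.com/ZhijuCen/chinese-plate-recognition-ccpd-remaster | plate_ocr/metrics/acc.py | _sequence_is_exactly_correct
-- ===== SOURCE A (Python) =====
-- from typing import Optional, Dict, Any, Iterable
--
-- def _sequence_is_exactly_correct(pred: Iterable,
--                                  target: Iterable,
--                                  drop_value: int = 0) -> bool:
--
--     def drop_continous(seq: Iterable) -> list:
--         kept_seq = list()
--         for v in seq:
--             if not kept_seq:
--                 kept_seq.append(v)
--             else:
--                 if v != kept_seq[-1]:
--                     kept_seq.append(v)
--         return kept_seq
--
--     def drop_value_in_seq(seq, value):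
--         return [v for v in seq if v != value]
--
--     pred: list = drop_value_in_seq(drop_continous(pred), drop_value)
--     target: list = drop_value_in_seq(drop_continous(target), drop_value)
--
--     return pred == target
-- ===== SOURCE B (Python) =====
-- def _sequence_is_exactly_correct(pred, target, drop_value=0):
--     def normalize(seq):
--         out = []
--         prev = None
--         first = True
--         for v in seq:
--             if (first or v != prev) and v != drop_value:
--                 out.append(v)
--             prev = v
--             first = False
--         return out
--     return normalize(pred) == normalize(target)
-- ===== Notes on version B (the rewrite author's own statement) =====
-- stated objective: simpler
-- what changed: Replaces A's two passes per sequence (collapse consecutive duplicates into a new list, then filter out drop_value) with a single fused pass tracking only the previous raw element, appending v exactly when it differs from the previous element and from drop_value.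
import Mathlib
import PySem

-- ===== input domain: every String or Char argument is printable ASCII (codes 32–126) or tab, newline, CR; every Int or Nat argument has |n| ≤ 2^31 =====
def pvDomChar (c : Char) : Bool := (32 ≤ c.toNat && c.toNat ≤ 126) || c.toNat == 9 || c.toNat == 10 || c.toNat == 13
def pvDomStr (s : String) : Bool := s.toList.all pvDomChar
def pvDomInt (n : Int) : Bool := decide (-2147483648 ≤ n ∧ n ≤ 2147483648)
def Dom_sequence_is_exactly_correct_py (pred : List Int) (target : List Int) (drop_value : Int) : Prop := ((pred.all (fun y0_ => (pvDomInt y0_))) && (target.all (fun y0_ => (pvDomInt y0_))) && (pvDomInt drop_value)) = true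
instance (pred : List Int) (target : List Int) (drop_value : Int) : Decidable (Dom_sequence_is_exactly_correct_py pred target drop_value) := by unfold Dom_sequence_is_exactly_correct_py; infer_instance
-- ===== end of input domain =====

-- B fuses A's two passes per sequence (collapse consecutive duplicates, then filter drop_value) into one pass tracking the previous raw element; objective: simpler.

-- ===== PORT A =====
-- drop_continous: append v unless kept_seq is nonempty and v equals its last element
def pvDropContinous (seq : List Int) : List Int :=
  seq.foldl (fun kept v =>
    if kept.isEmpty then kept ++ [v]
    else if v ≠ kept.getLast! then kept ++ [v] else kept) []

-- drop_value_in_seq: list comprehension filtering out value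
def pvDropValueInSeq (seq : List Int) (value : Int) : List Int :=
  seq.filter (fun v => v ≠ value)

def sequence_is_exactly_correct_py (pred : List Int) (target : List Int) (drop_value : Int) : Bool :=
  pvDropValueInSeq (pvDropContinous pred) drop_value
    = pvDropValueInSeq (pvDropContinous target) drop_value

-- ===== PORT B =====
-- normalize: single pass; prev = none is the "no previous element yet" sentinel
def pvNormalize (drop_value : Int) : Option Int → List Int → List Int
  | _, [] => []
  | prev, v :: rest =>
    if prev ≠ some v ∧ v ≠ drop_value then v :: pvNormalize drop_value (some v) rest
    else pvNormalize drop_value (some v) rest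

def sequence_is_exactly_correct_py_alt (pred : List Int) (target : List Int) (drop_value : Int) : Bool :=
  pvNormalize drop_value none pred = pvNormalize drop_value none target

-- ===== PRECONDITION & SPEC =====
def Spec_sequence_is_exactly_correct_py (pred : List Int) (target : List Int) (drop_value : Int) (out : Bool) : Prop := out = sequence_is_exactly_correct_py_alt pred target drop_value
instance (pred : List Int) (target : List Int) (drop_value : Int) (out : Bool) : Decidable (Spec_sequence_is_exactly_correct_py pred target drop_value out) := by unfold Spec_sequence_is_exactly_correct_py; infer_instance

-- ===== CLAIM (what is proved, stated in full; the proofs are below) =====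
def Claim_equal_sequence_is_exactly_correct_py : Prop := ∀ (pred : List Int) (target : List Int) (drop_value : Int), Dom_sequence_is_exactly_correct_py pred target drop_value → Spec_sequence_is_exactly_correct_py pred target drop_value (sequence_is_exactly_correct_py pred target drop_value)

-- ===== LEMMAS AND PROOFS =====

-- head-recursive form of A's collapse, parameterised by the previous element
def pvCollapse : Option Int → List Int → List Int
  | _, [] => []
  | prev, v :: rest =>
    if some v = prev then pvCollapse prev rest else v :: pvCollapse (some v) rest

theorem pvFoldl_collapse (seq : List Int) :
    ∀ ks : List Int, ks ≠ [] →
      seq.foldl (fun kept v =>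
        if kept.isEmpty then kept ++ [v]
        else if v ≠ kept.getLast! then kept ++ [v] else kept) ks
      = ks ++ pvCollapse (some ks.getLast!) seq := by
  induction seq with
  | nil => intro ks _; simp [pvCollapse]
  | cons v rest ih =>
    intro ks hks
    simp only [List.foldl_cons, List.isEmpty_eq_false_iff.mpr hks, Bool.false_eq_true,
      if_false, pvCollapse]
    by_cases hv : v = ks.getLast!
    · subst hv
      simp only [ne_eq, not_true_eq_false, if_false, if_true]
      exact ih ks hks
    · rw [if_pos hv, if_neg (fun h => hv (Option.some.inj h))]
      rw [ih (ks ++ [v]) (by simp)]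
      have hlast : (ks ++ [v]).getLast! = v := by
        cases ks with
        | nil => rfl
        | cons a as => simp [List.getLast!]
      rw [hlast, List.append_assoc]
      rfl

theorem pvDropContinous_eq (seq : List Int) :
    pvDropContinous seq = pvCollapse none seq := by
  cases seq with
  | nil => rfl
  | cons v rest =>
    unfold pvDropContinous
    simp only [List.foldl_cons, List.isEmpty_nil, if_true, List.nil_append]
    rw [pvFoldl_collapse rest [v] (by simp)]
    simp [pvCollapse]

theorem pvNormalize_eq_filter_collapse (drop_value : Int) (seq : List Int) :
    ∀ prev : Option Int,
      pvNormalize drop_value prev seq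
        = (pvCollapse prev seq).filter (fun v => v ≠ drop_value) := by
  induction seq with
  | nil => intro prev; rfl
  | cons v rest ih =>
    intro prev
    simp only [pvNormalize, pvCollapse]
    by_cases hp : some v = prev
    · subst hp
      simp only [ne_eq, not_true_eq_false, false_and, if_false, if_true]
      exact ih (some v)
    · rw [if_neg hp]
      by_cases hd : v = drop_value
      · rw [if_neg (fun h => h.2 hd)]
        rw [ih (some v)]
        simp [hd]
      · rw [if_pos (And.intro (fun h => hp (Eq.symm h)) hd)]
        simp [hd, ih (some v)]

-- ===== VERDICT (by name: the statement is the Claim_ definition above) =====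
theorem sequence_is_exactly_correct_py_spec : Claim_equal_sequence_is_exactly_correct_py := by
  intro pred target drop_value _
  unfold Spec_sequence_is_exactly_correct_py sequence_is_exactly_correct_py
    sequence_is_exactly_correct_py_alt pvDropValueInSeq
  rw [pvDropContinous_eq, pvDropContinous_eq,
    pvNormalize_eq_filter_collapse, pvNormalize_eq_filter_collapse]
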